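-- pv_equiv track=rewrite | github.com/chaeeerish/Algorithm-Python | 유형별/2. 구현/기둥과 보 설치.py | solution
-- ===== SOURCE A (Python) =====
-- import copy
--
-- def check_existence(answer, x, y, type):
--     if (x, y) in answer.keys():
--         if type in answer[(x, y)]:
--             return True
--         else:
--             return False
--     else:
--         return False
--
-- def check_rule(answer):
--     for key in answer:
--         if 0 in answer[key]: # 기둥
--             if key[0] == 0:
--                 continue
--             if check_existence(answer, key[0], key[1], 1):
--                 continue
--             if check_existence(answer, key[0], key[1] - 1, 1):
--                 continue
--             if check_existence(answer, key[0] - 1, key[1], 0):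
--                 continue
--             return False
--         if 1 in answer[key]: # 보
--             if check_existence(answer, key[0] - 1, key[1], 0):
--                 continue
--             if check_existence(answer, key[0] - 1, key[1] + 1, 0):
--                 continue
--             if check_existence(answer, key[0], key[1] - 1, 1) and check_existence(answer, key[0], key[1] + 1, 1):
--                 continue
--             return False
--     return True
--
-- def build(answer, seq):
--     new_answer = copy.deepcopy(answer)
--     if (seq[0], seq[1]) in new_answer.keys():
--         if seq[-1] == 1: # 설치
--             new_answer[(seq[0], seq[1])].add(seq[2])
--         else:
--             if seq[2] in new_answer[(seq[0], seq[1])]: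
--                 new_answer[(seq[0], seq[1])].remove(seq[2])
--     else:
--         if seq[-1] == 1:  # 설치
--             new_answer[(seq[0], seq[1])] = {seq[2]}
--
--     if check_rule(new_answer):
--         return new_answer
--     else:
--         return answer
--
-- def solution(n, build_frame):
--     for i in range(len(build_frame)):
--         build_frame[i][0], build_frame[i][1] = build_frame[i][1], build_frame[i][0]
--
--     answer = dict()
--     for seq in build_frame:
--         answer = build(answer, seq)
--
--     result = []
--     for k in answer.keys():
--         v = answer[k]
--         if len(v) == 0:
--             continue
--         elif len(v) == 1:
--             result.append([k[1], k[0], v.pop()])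
--         elif len(v) == 2:
--             result.append([k[1], k[0], v.pop()])
--             result.append([k[1], k[0], v.pop()])
--     result.sort(key=lambda x: (x[0], x[1], x[2]))
--
--     return result
-- ===== SOURCE B (Python) =====
-- # B: incremental simulation with LOCAL validity checking.
-- # Instead of deep-copying the whole structure and re-scanning every cell after
-- # each command (A), keep one grid dict and, after tentatively applying a command
-- # at (x, y), re-validate only the five cells whose rule can mention (x, y);
-- # revert the single change if one of them fails.  O(1) work per command.
-- # (Note: A mutates build_frame in place, swapping the first two entries of each
-- # row; B does not.  The equivalence claimed is about the return value only.)
--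
-- def solution(n, build_frame):
--     grid = {}  # (x, y) -> set of types installed there
--
--     def types(x, y):
--         return grid.get((x, y), ())
--
--     def cell_ok(x, y):
--         v = grid.get((x, y))
--         if not v:
--             return True
--         if 0 in v:  # pillar rule (checked first; it alone decides the cell)
--             return (y == 0 or 1 in v or 1 in types(x - 1, y)
--                     or 0 in types(x, y - 1))
--         if 1 in v:  # beam rule
--             return (0 in types(x, y - 1) or 0 in types(x + 1, y - 1)
--                     or (1 in types(x - 1, y) and 1 in types(x + 1, y)))
--         return True
--
--     def ok_after(x, y):
--         # the only cells whose rule can read cell (x, y)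
--         return all(cell_ok(cx, cy) for cx, cy in
--                    ((x, y), (x + 1, y), (x - 1, y), (x, y + 1), (x - 1, y + 1)))
--
--     for seq in build_frame:
--         x, y, t, op = seq[0], seq[1], seq[2], seq[-1]
--         if op == 1:  # install
--             s = grid.setdefault((x, y), set())
--             if t not in s:
--                 s.add(t)
--                 if not ok_after(x, y):
--                     s.remove(t)
--         else:        # delete
--             s = grid.get((x, y))
--             if s is not None and t in s:
--                 s.remove(t)
--                 if not ok_after(x, y):
--                     s.add(t)
--
--     # A's output loop emits a cell only when it holds one or two types; commands
--     # may carry any integer as the 'type', so a cell can accumulate more and is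
--     # then omitted (with types 0/1 only, this is simply every nonempty cell).
--     return sorted([x, y, t] for (x, y), s in grid.items()
--                   if len(s) in (1, 2) for t in s)
-- ===== Notes on version B (the rewrite author's own statement) =====
-- stated objective: faster
-- what changed: B keeps a single mutable grid and, after tentatively applying each command, re-validates only the five cells whose support rule can mention the changed coordinate (reverting the one change on failure), instead of A's per-command deepcopy of the whole dict plus a full rescan of every installed cell; the final list is built by one comprehension and sorted once.
-- outside the precondition, e.g. on solution(0, [[5, 7]]): A returns [], B raises IndexError; on solution(2, [[0], [0, 0, 0, 1]]): A raises IndexError, B raises IndexError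
import Mathlib
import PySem

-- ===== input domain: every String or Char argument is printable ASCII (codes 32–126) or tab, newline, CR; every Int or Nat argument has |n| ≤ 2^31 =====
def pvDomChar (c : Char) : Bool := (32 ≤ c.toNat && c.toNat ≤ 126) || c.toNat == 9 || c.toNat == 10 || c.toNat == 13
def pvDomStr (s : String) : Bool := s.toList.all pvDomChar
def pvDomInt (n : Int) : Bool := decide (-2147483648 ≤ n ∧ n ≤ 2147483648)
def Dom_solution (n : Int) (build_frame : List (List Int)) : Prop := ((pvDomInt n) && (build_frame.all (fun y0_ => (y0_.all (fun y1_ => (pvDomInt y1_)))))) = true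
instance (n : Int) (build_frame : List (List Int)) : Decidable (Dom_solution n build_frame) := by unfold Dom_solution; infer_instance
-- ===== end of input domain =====

-- B replaces A's per-command whole-structure deepcopy + full rescan by one grid
-- with a local 5-cell validity check per command (objective: faster).
-- Note: the Python A mutates build_frame in place (swapping the first two
-- entries of each row); the equivalence claimed here is about the return value only.

-- ===== PORT A =====

-- check_existence(answer, x, y, type)
def checkExistence (answer : PySem.Dict (Int × Int) (PySem.Set Int)) (x y ty : Int) : Bool :=
  match answer.get? (x, y) with
  | some v => if PySem.Set.contains v ty then true else false
  | none => false

-- the 'for key in answer:' loop of check_rule, with its early 'return False'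
def checkRuleGo (answer : PySem.Dict (Int × Int) (PySem.Set Int)) : List (Int × Int) → Bool
  | [] => true
  | key :: rest =>
    let v := answer.getD key PySem.Set.empty   -- answer[key]; key comes from answer's key list
    if PySem.Set.contains v 0 then             -- 기둥 (pillar)
      if key.1 == 0 then checkRuleGo answer rest
      else if checkExistence answer key.1 key.2 1 then checkRuleGo answer rest
      else if checkExistence answer key.1 (key.2 - 1) 1 then checkRuleGo answer rest
      else if checkExistence answer (key.1 - 1) key.2 0 then checkRuleGo answer rest
      else false
    else if PySem.Set.contains v 1 then        -- 보 (beam)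
      if checkExistence answer (key.1 - 1) key.2 0 then checkRuleGo answer rest
      else if checkExistence answer (key.1 - 1) (key.2 + 1) 0 then checkRuleGo answer rest
      else if checkExistence answer key.1 (key.2 - 1) 1 && checkExistence answer key.1 (key.2 + 1) 1 then checkRuleGo answer rest
      else false
    else checkRuleGo answer rest

def checkRule (answer : PySem.Dict (Int × Int) (PySem.Set Int)) : Bool :=
  checkRuleGo answer answer.keys

-- build(answer, seq); copy.deepcopy of an immutable Lean value is the value itself
def buildA (answer : PySem.Dict (Int × Int) (PySem.Set Int)) (seq : List Int) :
    PySem.Dict (Int × Int) (PySem.Set Int) :=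
  let s0 := (PySem.List.pyGet? seq 0).getD 0
  let s1 := (PySem.List.pyGet? seq 1).getD 0
  let s2 := (PySem.List.pyGet? seq 2).getD 0
  let slast := (PySem.List.pyGet? seq (-1)).getD 0
  let new_answer :=
    if (answer.get? (s0, s1)).isSome then
      if slast == 1 then                       -- 설치: new_answer[(s0,s1)].add(s2)
        answer.modify (s0, s1) PySem.Set.empty (fun v => PySem.Set.add v s2)
      else
        let v := answer.getD (s0, s1) PySem.Set.empty
        if PySem.Set.contains v s2 then answer.insert (s0, s1) (PySem.Set.discard v s2)  -- .remove(s2), guarded by the 'in' test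
        else answer
    else
      if slast == 1 then answer.insert (s0, s1) (PySem.Set.add PySem.Set.empty s2)  -- {seq[2]}
      else answer
  if checkRule new_answer then new_answer else answer

-- key=lambda x: (x[0], x[1], x[2]) — a Python 3-tuple of ints compares lexicographically,
-- which is exactly the Lex product order used here
def rowKeyA (r : List Int) : Lex (Int × Lex (Int × Int)) :=
  toLex ((PySem.List.pyGet? r 0).getD 0,
         toLex ((PySem.List.pyGet? r 1).getD 0, (PySem.List.pyGet? r 2).getD 0))

def solution (n : Int) (build_frame : List (List Int)) : List (List Int) :=
  -- for i in range(len(build_frame)): swap of row[0] and row[1] (exact for rows of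
  -- length ≥ 2; shorter rows raise IndexError in Python and are excluded by Pre_)
  let bf := build_frame.map (fun r =>
    ((PySem.List.pyGet? r 1).getD 0) :: ((PySem.List.pyGet? r 0).getD 0) :: r.drop 2)
  let answer := bf.foldl buildA PySem.Dict.empty
  -- v.pop(): Python's set iteration order is not modelled (PYSEM); the two popped
  -- elements are taken in the Set's stored order — immaterial, result.sort() below
  -- orders the rows by their full contents
  let result := answer.items.foldl (fun res kv =>
    let k := kv.1
    let v := kv.2
    if PySem.Set.len v == 0 then res
    else if PySem.Set.len v == 1 then
      res ++ [[k.2, k.1, (PySem.List.pyGet? v 0).getD 0]]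
    else if PySem.Set.len v == 2 then
      res ++ [[k.2, k.1, (PySem.List.pyGet? v 0).getD 0], [k.2, k.1, (PySem.List.pyGet? v 1).getD 0]]
    else res) []
  PySem.List.sorted result rowKeyA false

-- ===== PORT B =====

-- types(x, y): grid.get((x, y), ()) — only membership of the result is used
def bTypes (grid : PySem.Dict (Int × Int) (PySem.Set Int)) (x y : Int) : PySem.Set Int :=
  grid.getD (x, y) PySem.Set.empty

-- cell_ok(x, y)
def bCellOk (grid : PySem.Dict (Int × Int) (PySem.Set Int)) (x y : Int) : Bool :=
  let v := grid.getD (x, y) PySem.Set.empty   -- grid.get((x,y)); 'if not v' covers None and the empty set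
  if PySem.Set.len v == 0 then true
  else if PySem.Set.contains v 0 then         -- pillar rule (checked first; it alone decides the cell)
    (y == 0 || PySem.Set.contains v 1 || PySem.Set.contains (bTypes grid (x - 1) y) 1
     || PySem.Set.contains (bTypes grid x (y - 1)) 0)
  else if PySem.Set.contains v 1 then         -- beam rule
    (PySem.Set.contains (bTypes grid x (y - 1)) 0 || PySem.Set.contains (bTypes grid (x + 1) (y - 1)) 0
     || (PySem.Set.contains (bTypes grid (x - 1) y) 1 && PySem.Set.contains (bTypes grid (x + 1) y) 1))
  else true

-- ok_after(x, y): the five cells whose rule can read cell (x, y)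
def bOkAfter (grid : PySem.Dict (Int × Int) (PySem.Set Int)) (x y : Int) : Bool :=
  [(x, y), (x + 1, y), (x - 1, y), (x, y + 1), (x - 1, y + 1)].all
    (fun c => bCellOk grid c.1 c.2)

-- one command of B's loop.  Python reverts by mutating the same set back
-- (s.remove(t); … s.add(t)), which re-appends t: no observable difference for a
-- set, so the Lean port reverts to the previous dict value.
def bStep (grid : PySem.Dict (Int × Int) (PySem.Set Int)) (seq : List Int) :
    PySem.Dict (Int × Int) (PySem.Set Int) :=
  let x := (PySem.List.pyGet? seq 0).getD 0
  let y := (PySem.List.pyGet? seq 1).getD 0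
  let t := (PySem.List.pyGet? seq 2).getD 0
  let op := (PySem.List.pyGet? seq (-1)).getD 0
  if op == 1 then                              -- install
    let g1 := grid.setdefault (x, y) PySem.Set.empty
    let s := g1.getD (x, y) PySem.Set.empty
    if PySem.Set.contains s t then g1
    else
      let g2 := g1.insert (x, y) (PySem.Set.add s t)
      if bOkAfter g2 x y then g2 else g1
  else                                         -- delete
    match grid.get? (x, y) with
    | none => grid
    | some s =>
      if PySem.Set.contains s t then
        let g2 := grid.insert (x, y) (PySem.Set.discard s t)
        if bOkAfter g2 x y then g2 else grid
      else grid

def solution_alt (n : Int) (build_frame : List (List Int)) : List (List Int) :=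
  let grid := build_frame.foldl bStep PySem.Dict.empty
  -- 'if len(s) in (1, 2)': only cells holding one or two types are emitted (as in A)
  let rows := grid.items.flatMap (fun kv =>
    if PySem.Set.len kv.2 == 1 || PySem.Set.len kv.2 == 2 then
      kv.2.map (fun t => [kv.1.1, kv.1.2, t])
    else [])
  -- sorted(...) compares the length-3 rows themselves: Python list comparison on
  -- 3-element int rows is exactly the lexicographic triple key rowKeyA
  PySem.List.sorted rows rowKeyA false

-- ===== PRECONDITION & SPEC =====
-- Each command row needs its three coordinates [x, y, type]: on shorter rows A
-- raises IndexError in all but one accidental corner (a 2-entry row whose last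
-- entry is not 1 and whose coordinate holds no installed type slips through A's
-- build as a no-op without ever reading the missing type, while B, which reads
-- all three entries up front, raises there too early) — Pre_ excludes rows
-- shorter than 3 entirely.
def Pre_solution (n : Int) (build_frame : List (List Int)) : Prop :=
  ∀ r ∈ build_frame, 3 ≤ r.length
instance (n : Int) (build_frame : List (List Int)) : Decidable (Pre_solution n build_frame) := by
  unfold Pre_solution; infer_instance

def pvWitness_solution : Int × List (List Int) := (2, [[0, 0, 0, 1], [0, 1, 1, 1], [0, 1, 0, 0]])

def Spec_solution (n : Int) (build_frame : List (List Int)) (out : List (List Int)) : Prop := out = solution_alt n build_frame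
instance (n : Int) (build_frame : List (List Int)) (out : List (List Int)) : Decidable (Spec_solution n build_frame out) := by unfold Spec_solution; infer_instance

-- ===== CLAIM (what is proved, stated in full; the proofs are below) =====
def Claim_equal_solution : Prop := ∀ (n : Int) (build_frame : List (List Int)), Dom_solution n build_frame → Pre_solution n build_frame → Spec_solution n build_frame (solution n build_frame)

-- ===== LEMMAS AND PROOFS =====

-- abstract cell contents: m x y t = "a structure of type t is installed at (x, y)"
def CellMem := Int → Int → Int → Bool

-- the per-cell rule both programs enforce, over abstract contents
def cellok (m : CellMem) (x y : Int) : Bool :=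
  if m x y 0 then (y == 0 || m x y 1 || m (x - 1) y 1 || m x (y - 1) 0)
  else if m x y 1 then (m x (y - 1) 0 || m (x + 1) (y - 1) 0 || (m (x - 1) y 1 && m (x + 1) y 1))
  else true

-- contents of A's dict (A keys cells as (y, x)) and of B's grid (keyed (x, y))
def memA (a : PySem.Dict (Int × Int) (PySem.Set Int)) : CellMem :=
  fun x y t => PySem.Set.contains (a.getD (y, x) PySem.Set.empty) t
def memB (g : PySem.Dict (Int × Int) (PySem.Set Int)) : CellMem :=
  fun x y t => PySem.Set.contains (g.getD (x, y) PySem.Set.empty) t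

-- the single-cell update both tentative states perform
def updMem (m : CellMem) (x y t : Int) (b : Bool) : CellMem :=
  fun u v s => if u = x ∧ v = y ∧ s = t then b else m u v s


-- A's check_rule is the rule at every cell

-- B's five-cell check


-- locality: after a change at one cell of a valid state, global validity is
-- validity of the five cells whose rule can read the changed cell

-- well-formed stored sets: distinct elements, all types 0 or 1
def WF (d : PySem.Dict (Int × Int) (PySem.Set Int)) : Prop :=
  ∀ k : Int × Int, (d.getD k PySem.Set.empty).Nodup

-- the loop invariant
def StInv (a g : PySem.Dict (Int × Int) (PySem.Set Int)) : Prop :=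
  a.keys.Nodup ∧ g.keys.Nodup ∧ WF a ∧ WF g ∧
  (∀ x y t, memA a x y t = memB g x y t) ∧
  (∀ u v, cellok (memA a) u v = true)



theorem XbCellOk_eq (g : PySem.Dict (Int × Int) (PySem.Set Int)) (x y : Int) :
    bCellOk g x y = cellok (memB g) x y := by
  unfold bCellOk cellok memB bTypes
  cases hv : g.getD (x, y) PySem.Set.empty with
  | nil => simp [PySem.Set.len, PySem.Set.contains]
  | cons a l => simp [PySem.Set.len]; intro h; omega

theorem XbOkAfter_iff (g : PySem.Dict (Int × Int) (PySem.Set Int)) (x y : Int) :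
    bOkAfter g x y = true ↔
      (cellok (memB g) x y = true ∧ cellok (memB g) (x + 1) y = true ∧
       cellok (memB g) (x - 1) y = true ∧ cellok (memB g) x (y + 1) = true ∧
       cellok (memB g) (x - 1) (y + 1) = true) := by
  simp [bOkAfter, XbCellOk_eq]

theorem Xcellok_congr (m m' : CellMem) (x y : Int)
    (h : ∀ u v, ((u = x ∧ v = y) ∨ (u = x - 1 ∧ v = y) ∨ (u = x ∧ v = y - 1) ∨
                 (u = x + 1 ∧ v = y - 1) ∨ (u = x + 1 ∧ v = y)) → ∀ t, m u v t = m' u v t) :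
    cellok m x y = cellok m' x y := by
  unfold cellok
  simp only [h x y (by tauto), h (x-1) y (by tauto), h x (y-1) (by tauto),
      h (x+1) (y-1) (by tauto), h (x+1) y (by tauto)]

theorem Xlocal_global (m m' : CellMem) (x y : Int)
    (hold : ∀ u v, cellok m u v = true)
    (hch : ∀ u v t, ¬ (u = x ∧ v = y) → m' u v t = m u v t) :
    (∀ u v, cellok m' u v = true) ↔
      (cellok m' x y = true ∧ cellok m' (x + 1) y = true ∧ cellok m' (x - 1) y = true ∧
       cellok m' x (y + 1) = true ∧ cellok m' (x - 1) (y + 1) = true) := by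
  constructor
  · intro H; exact ⟨H _ _, H _ _, H _ _, H _ _, H _ _⟩
  · rintro ⟨h1, h2, h3, h4, h5⟩ u v
    by_cases c1 : u = x ∧ v = y; · obtain ⟨rfl, rfl⟩ := c1; exact h1
    by_cases c2 : u = x + 1 ∧ v = y; · obtain ⟨rfl, rfl⟩ := c2; exact h2
    by_cases c3 : u = x - 1 ∧ v = y; · obtain ⟨rfl, rfl⟩ := c3; exact h3
    by_cases c4 : u = x ∧ v = y + 1; · obtain ⟨rfl, rfl⟩ := c4; exact h4
    by_cases c5 : u = x - 1 ∧ v = y + 1; · obtain ⟨rfl, rfl⟩ := c5; exact h5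
    rw [Xcellok_congr m' m u v ?_]
    · exact hold u v
    · intro p q hpq t
      apply hch; rcases hpq with ⟨rfl,rfl⟩|⟨rfl,rfl⟩|⟨rfl,rfl⟩|⟨rfl,rfl⟩|⟨rfl,rfl⟩ <;> omega

theorem XcheckExistence_eq (a : PySem.Dict (Int × Int) (PySem.Set Int)) (p q t : Int) :
    checkExistence a p q t = PySem.Set.contains (a.getD (p, q) PySem.Set.empty) t := by
  unfold checkExistence
  rw [PySem.Dict.getD_eq_get?_getD]
  cases h : a.get? (p, q) with
  | none => simp [PySem.Set.contains, PySem.Set.empty]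
  | some v => simp

theorem XcheckRuleGo_eq_all (a : PySem.Dict (Int × Int) (PySem.Set Int)) (l : List (Int × Int)) :
    checkRuleGo a l = l.all (fun k => cellok (memA a) k.2 k.1) := by
  induction l with
  | nil => rfl
  | cons k rest ih =>
    simp only [checkRuleGo, List.all_cons, ← ih]
    simp only [XcheckExistence_eq, cellok, memA]
    split_ifs <;> simp_all

theorem XcheckRule_iff (a : PySem.Dict (Int × Int) (PySem.Set Int)) :
    checkRule a = true ↔ ∀ x y, cellok (memA a) x y = true := by
  rw [checkRule, XcheckRuleGo_eq_all, List.all_eq_true]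
  constructor
  · intro H x y
    by_cases hk : (y, x) ∈ a.keys
    · exact H (y, x) hk
    · have hc : a.contains (y, x) = false := by
        rw [PySem.Dict.contains_eq_decide_mem_keys]; simp [hk]
      have hd : a.getD (y, x) PySem.Set.empty = PySem.Set.empty :=
        PySem.Dict.getD_of_not_contains a PySem.Set.empty hc
      unfold cellok memA
      simp only [PySem.Set.empty] at hd
      simp [hd]
  · intro H k _; exact H k.2 k.1
theorem Xcontains_add (w : PySem.Set Int) (t s : Int) :
    PySem.Set.contains (PySem.Set.add w t) s = (PySem.Set.contains w s || s == t) := by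
  by_cases h : s ∈ PySem.Set.add w t <;>
    simp_all [PySem.Set.mem_add] <;> tauto

theorem Xcontains_discard (w : PySem.Set Int) (t s : Int) :
    PySem.Set.contains (PySem.Set.discard w t) s = (PySem.Set.contains w s && !(s == t)) := by
  by_cases h : s ∈ PySem.Set.discard w t <;>
    simp_all [PySem.Set.mem_discard] <;> tauto

theorem XgetD_setdefault' (g : PySem.Dict (Int × Int) (PySem.Set Int)) (k k' : Int × Int) :
    (g.setdefault k PySem.Set.empty).getD k' PySem.Set.empty = g.getD k' PySem.Set.empty := by
  by_cases h : k' = k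
  · subst h; rw [PySem.Dict.getD_setdefault_self]
  · rw [PySem.Dict.getD_eq_get?_getD, PySem.Dict.get?_setdefault_of_ne (hne := h),
        ← PySem.Dict.getD_eq_get?_getD]

theorem Xsome_of_contains (d : PySem.Dict (Int × Int) (PySem.Set Int)) (k : Int × Int) (t : Int)
    (h : PySem.Set.contains (d.getD k PySem.Set.empty) t = true) :
    d.get? k = some (d.getD k PySem.Set.empty) := by
  cases hg : d.get? k with
  | none => rw [PySem.Dict.getD_eq_get?_getD, hg] at h; simp [PySem.Set.contains, Option.getD] at h
  | some v => rw [PySem.Dict.getD_eq_get?_getD, hg]; rfl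
theorem XmemA_insert (a : PySem.Dict (Int × Int) (PySem.Set Int)) (x0 y0 : Int) (w : PySem.Set Int) :
    memA (a.insert (y0, x0) w) =
      fun u v s => if u = x0 ∧ v = y0 then PySem.Set.contains w s else memA a u v s := by
  funext u v s
  unfold memA
  rw [PySem.Dict.getD_insert]
  simp only [Prod.mk.injEq]
  split_ifs with h1 h2 h2 <;> tauto

theorem XmemA_modify (a : PySem.Dict (Int × Int) (PySem.Set Int)) (x0 y0 : Int)
    (f : PySem.Set Int → PySem.Set Int) :
    memA (a.modify (y0, x0) PySem.Set.empty f) =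
      fun u v s => if u = x0 ∧ v = y0 then PySem.Set.contains (f (a.getD (y0, x0) PySem.Set.empty)) s
                   else memA a u v s := by
  funext u v s
  unfold memA
  rw [PySem.Dict.getD_modify]
  simp only [Prod.mk.injEq]
  split_ifs with h1 h2 h2 <;> first | rfl | tauto | (obtain ⟨rfl, rfl⟩ := h1; rfl)

theorem XmemB_insert (g : PySem.Dict (Int × Int) (PySem.Set Int)) (x0 y0 : Int) (w : PySem.Set Int) :
    memB (g.insert (x0, y0) w) =
      fun u v s => if u = x0 ∧ v = y0 then PySem.Set.contains w s else memB g u v s := by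
  funext u v s
  unfold memB
  rw [PySem.Dict.getD_insert]
  simp only [Prod.mk.injEq]
  split_ifs with h1 h2 h2 <;> tauto

theorem XmemB_setdefault (g : PySem.Dict (Int × Int) (PySem.Set Int)) (k : Int × Int) :
    memB (g.setdefault k PySem.Set.empty) = memB g := by
  funext u v s
  unfold memB
  rw [XgetD_setdefault']
theorem pg0' (a : Int) (l : List Int) : PySem.List.pyGet? (a::l) 0 = some a :=
  PySem.List.pyGet?_zero_cons a l
theorem pg1' (a b : Int) (l : List Int) : PySem.List.pyGet? (a::b::l) 1 = some b := by
  rw [PySem.List.pyGet?_of_nonneg (xs := a::b::l) (i := 1) (by omega)]; simp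
theorem pg2' (a b c : Int) (l : List Int) : PySem.List.pyGet? (a::b::c::l) 2 = some c := by
  rw [PySem.List.pyGet?_of_nonneg (xs := a::b::c::l) (i := 2) (by omega)]; simp
theorem pgm1' (a b c : Int) (l : List Int) : PySem.List.pyGet? (a::b::c::l) (-1) = (c::l).getLast? := by
  rw [PySem.List.pyGet?_neg_one]; simp

-- check decision agreement for corresponding single-cell tentative states
theorem Xcheck_eq (a g a2 g2 : PySem.Dict (Int × Int) (PySem.Set Int)) (x y t : Int) (b : Bool)
    (hmem : ∀ u v s, memA a u v s = memB g u v s)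
    (hvalid : ∀ u v, cellok (memA a) u v = true)
    (ha2 : memA a2 = updMem (memA a) x y t b)
    (hg2 : memB g2 = updMem (memB g) x y t b) :
    checkRule a2 = bOkAfter g2 x y := by
  have hmm : memA a2 = memB g2 := by
    rw [ha2, hg2]; funext u v s; unfold updMem
    split_ifs
    · rfl
    · exact hmem u v s
  have hloc := Xlocal_global (memA a) (memA a2) x y hvalid (by
    intro u v s h
    rw [ha2]; unfold updMem; rw [if_neg (by tauto)])
  rw [Bool.eq_iff_iff, XcheckRule_iff, XbOkAfter_iff, ← hmm]
  exact hloc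

theorem Xnodup_setdefault (g : PySem.Dict (Int × Int) (PySem.Set Int)) (k : Int × Int)
    (h : g.keys.Nodup) : (g.setdefault k PySem.Set.empty).keys.Nodup := by
  by_cases hc : g.contains k = true
  · rw [PySem.Dict.setdefault_of_contains (h := hc)]; exact h
  · rw [PySem.Dict.setdefault_of_not_contains (h := by simpa using hc)]
    exact PySem.Dict.nodup_keys_insert _ _ _ h

theorem XWF_insert (d : PySem.Dict (Int × Int) (PySem.Set Int)) (k : Int × Int)
    (w : PySem.Set Int) (hWF : WF d) (hw : w.Nodup) :
    WF (d.insert k w) := by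
  intro k'
  rw [PySem.Dict.getD_insert]
  split_ifs
  · exact hw
  · exact hWF k'

theorem XWF_setdefault (d : PySem.Dict (Int × Int) (PySem.Set Int)) (k : Int × Int)
    (hWF : WF d) : WF (d.setdefault k PySem.Set.empty) := by
  intro k'; rw [XgetD_setdefault']; exact hWF k'

theorem XWF_modify_add (d : PySem.Dict (Int × Int) (PySem.Set Int)) (k : Int × Int) (t : Int)
    (hWF : WF d) :
    WF (d.modify k PySem.Set.empty (fun v => PySem.Set.add v t)) := by
  intro k'
  rw [PySem.Dict.getD_modify]
  split_ifs
  · exact PySem.Set.nodup_add _ _ (hWF k)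
  · exact hWF k'

-- tentative-content lemmas
theorem XmemA_add (a : PySem.Dict (Int × Int) (PySem.Set Int)) (x y t : Int) :
    memA (a.modify (y, x) PySem.Set.empty (fun v => PySem.Set.add v t)) =
      updMem (memA a) x y t true := by
  rw [XmemA_modify]; funext u v s; unfold updMem memA
  split_ifs with h1 h2 h2 <;> try tauto
  · obtain ⟨rfl, rfl⟩ := h1; obtain ⟨_, _, rfl⟩ := h2
    simp [Xcontains_add]
  · obtain ⟨rfl, rfl⟩ := h1
    rw [Xcontains_add]
    have : (s == t) = false := by simp; tauto
    simp [this]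

theorem XmemA_insert_fresh (a : PySem.Dict (Int × Int) (PySem.Set Int)) (x y t : Int)
    (hnone : a.get? (y, x) = none) :
    memA (a.insert (y, x) (PySem.Set.add PySem.Set.empty t)) =
      updMem (memA a) x y t true := by
  rw [XmemA_insert]; funext u v s; unfold updMem memA
  have hcur : a.getD (y, x) PySem.Set.empty = PySem.Set.empty := by
    rw [PySem.Dict.getD_eq_get?_getD, hnone]; rfl
  split_ifs with h1 h2 h2 <;> try tauto
  · obtain ⟨rfl, rfl⟩ := h1; obtain ⟨_, _, rfl⟩ := h2
    simp [Xcontains_add, PySem.Set.contains, PySem.Set.empty]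
  · obtain ⟨rfl, rfl⟩ := h1
    rw [Xcontains_add, hcur]
    have : (s == t) = false := by simp; tauto
    simp [this, PySem.Set.contains, PySem.Set.empty]

theorem XmemA_del (a : PySem.Dict (Int × Int) (PySem.Set Int)) (x y t : Int) :
    memA (a.insert (y, x) (PySem.Set.discard (a.getD (y, x) PySem.Set.empty) t)) =
      updMem (memA a) x y t false := by
  rw [XmemA_insert]; funext u v s; unfold updMem memA
  split_ifs with h1 h2 h2 <;> try tauto
  · obtain ⟨rfl, rfl⟩ := h1; obtain ⟨_, _, rfl⟩ := h2
    simp [Xcontains_discard]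
  · obtain ⟨rfl, rfl⟩ := h1
    rw [Xcontains_discard]
    have : (s == t) = false := by simp; tauto
    simp [this]

theorem XmemB_add (g : PySem.Dict (Int × Int) (PySem.Set Int)) (x y t : Int) :
    memB ((g.setdefault (x, y) PySem.Set.empty).insert (x, y)
      (PySem.Set.add ((g.setdefault (x, y) PySem.Set.empty).getD (x, y) PySem.Set.empty) t)) =
      updMem (memB g) x y t true := by
  simp only [XmemB_insert, XmemB_setdefault, XgetD_setdefault']
  funext u v s; unfold updMem memB
  split_ifs with h1 h2 h2 <;> try tauto
  · obtain ⟨rfl, rfl⟩ := h1; obtain ⟨_, _, rfl⟩ := h2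
    simp [Xcontains_add]
  · obtain ⟨rfl, rfl⟩ := h1
    rw [Xcontains_add]
    have : (s == t) = false := by simp; tauto
    simp [this]

theorem XmemB_del (g : PySem.Dict (Int × Int) (PySem.Set Int)) (x y t : Int) :
    memB (g.insert (x, y) (PySem.Set.discard (g.getD (x, y) PySem.Set.empty) t)) =
      updMem (memB g) x y t false := by
  rw [XmemB_insert]; funext u v s; unfold updMem memB
  split_ifs with h1 h2 h2 <;> try tauto
  · obtain ⟨rfl, rfl⟩ := h1; obtain ⟨_, _, rfl⟩ := h2
    simp [Xcontains_discard]
  · obtain ⟨rfl, rfl⟩ := h1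
    rw [Xcontains_discard]
    have : (s == t) = false := by simp; tauto
    simp [this]
theorem Xstep_inv (a g : PySem.Dict (Int × Int) (PySem.Set Int)) (r : List Int)
    (hInv : StInv a g) (hlen : 3 ≤ r.length) :
    StInv (buildA a (((PySem.List.pyGet? r 1).getD 0) :: ((PySem.List.pyGet? r 0).getD 0) :: r.drop 2))
        (bStep g r) := by
  obtain ⟨hndA, hndG, hwfA, hwfG, hmem, hvalid⟩ := hInv
  rcases r with _ | ⟨rx, r⟩; · simp at hlen
  rcases r with _ | ⟨ry, r⟩; · simp at hlen
  rcases r with _ | ⟨rt, rest⟩; · simp at hlen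
  unfold buildA bStep
  simp only [pg0', pg1', pg2', pgm1', List.drop_succ_cons, List.drop_zero, Option.getD_some]
  set op := (rt :: rest).getLast?.getD 0 with hop
  set cur := a.getD (ry, rx) PySem.Set.empty with hcur
  set curB := g.getD (rx, ry) PySem.Set.empty with hcurB
  have hmem' : ∀ u v s, memA a u v s = memB g u v s := hmem
  have hcc : ∀ s, PySem.Set.contains cur s = PySem.Set.contains curB s := fun s => hmem rx ry s
  by_cases hb : (op == 1) = true
  · -- install
    simp only [hb, if_true]
    by_cases hin : PySem.Set.contains cur rt = true
    · -- already installed: both states unchanged in content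
      have hsome : a.get? (ry, rx) = some cur := Xsome_of_contains a _ rt hin
      rw [hsome]
      simp only [Option.isSome_some, if_true]
      have hA2 : memA (a.modify (ry, rx) PySem.Set.empty (fun v => PySem.Set.add v rt)) = memA a := by
        rw [XmemA_add]; funext u v s; unfold updMem
        split_ifs with h
        · obtain ⟨rfl, rfl, rfl⟩ := h; exact hin.symm
        · rfl
      have hchk : checkRule (a.modify (ry, rx) PySem.Set.empty (fun v => PySem.Set.add v rt)) = true := by
        rw [XcheckRule_iff, hA2]; exact hvalid
      rw [if_pos hchk]
      have hinB : PySem.Set.contains ((g.setdefault (rx, ry) PySem.Set.empty).getD (rx, ry) PySem.Set.empty) rt = true := by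
        rw [XgetD_setdefault']; rw [← hcurB, ← hcc]; exact hin
      rw [if_pos hinB]
      refine ⟨?_, Xnodup_setdefault g _ hndG, ?_, XWF_setdefault g _ hwfG, ?_, ?_⟩
      · exact PySem.Dict.nodup_keys_insert _ _ _ hndA
      · exact XWF_modify_add a _ rt hwfA
      · intro x y t; rw [hA2, XmemB_setdefault]; exact hmem x y t
      · intro u v; rw [hA2]; exact hvalid u v
    · -- real install
      have hinB : PySem.Set.contains ((g.setdefault (rx, ry) PySem.Set.empty).getD (rx, ry) PySem.Set.empty) rt = false := by
        rw [XgetD_setdefault', ← hcurB, ← hcc]; simpa using hin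
      rw [hinB]
      simp only [Bool.false_eq_true, if_false]
      have hB2 := XmemB_add g rx ry rt
      -- A side: two shapes of the tentative dict, both with content updMem … true
      by_cases hsome : (a.get? (ry, rx)).isSome = true
      · -- key present: modify-add
        rw [if_pos hsome]
        have hA2 := XmemA_add a rx ry rt
        have hce := Xcheck_eq a g _ _ rx ry rt true hmem' hvalid hA2 hB2
        rw [hce]
        by_cases hok : bOkAfter ((g.setdefault (rx, ry) PySem.Set.empty).insert (rx, ry)
            (PySem.Set.add ((g.setdefault (rx, ry) PySem.Set.empty).getD (rx, ry) PySem.Set.empty) rt)) rx ry = true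
        · rw [hok]; simp only [if_true]
          refine ⟨?_, ?_, ?_, ?_, ?_, ?_⟩
          · exact PySem.Dict.nodup_keys_insert _ _ _ hndA
          · exact PySem.Dict.nodup_keys_insert _ _ _ (Xnodup_setdefault g _ hndG)
          · exact XWF_modify_add a _ rt hwfA
          · refine XWF_insert _ _ _ (XWF_setdefault g _ hwfG) ?_
            exact PySem.Set.nodup_add _ _ (by rw [XgetD_setdefault']; exact hwfG _)
          · intro x y t; rw [hA2, hB2]; unfold updMem; split_ifs with hh; exacts [rfl, hmem x y t]
          · rw [← XcheckRule_iff]; rw [hce]; exact hok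
        · rw [Bool.not_eq_true] at hok
          rw [hok]
          simp only [Bool.false_eq_true, if_false]
          exact ⟨hndA, Xnodup_setdefault g _ hndG, hwfA, XWF_setdefault g _ hwfG,
            by intro x y t; rw [XmemB_setdefault]; exact hmem x y t, hvalid⟩
      · -- key absent: insert fresh
        have hnone : a.get? (ry, rx) = none := by
          cases hg : a.get? (ry, rx)
          · rfl
          · rw [hg] at hsome; simp at hsome
        rw [if_neg hsome]
        have hA2 := XmemA_insert_fresh a rx ry rt hnone
        have hce := Xcheck_eq a g _ _ rx ry rt true hmem' hvalid hA2 hB2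
        rw [hce]
        by_cases hok : bOkAfter ((g.setdefault (rx, ry) PySem.Set.empty).insert (rx, ry)
            (PySem.Set.add ((g.setdefault (rx, ry) PySem.Set.empty).getD (rx, ry) PySem.Set.empty) rt)) rx ry = true
        · rw [hok]; simp only [if_true]
          refine ⟨PySem.Dict.nodup_keys_insert _ _ _ hndA,
            PySem.Dict.nodup_keys_insert _ _ _ (Xnodup_setdefault g _ hndG), ?_, ?_, ?_, ?_⟩
          · exact XWF_insert _ _ _ hwfA (PySem.Set.nodup_add _ _ (by constructor))
          · refine XWF_insert _ _ _ (XWF_setdefault g _ hwfG) ?_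
            exact PySem.Set.nodup_add _ _ (by rw [XgetD_setdefault']; exact hwfG _)
          · intro x y t; rw [hA2, hB2]; unfold updMem; split_ifs with hh; exacts [rfl, hmem x y t]
          · rw [← XcheckRule_iff]; rw [hce]; exact hok
        · rw [Bool.not_eq_true] at hok
          rw [hok]
          simp only [Bool.false_eq_true, if_false]
          exact ⟨hndA, Xnodup_setdefault g _ hndG, hwfA, XWF_setdefault g _ hwfG,
            by intro x y t; rw [XmemB_setdefault]; exact hmem x y t, hvalid⟩
  · -- delete
    simp only [hb, Bool.false_eq_true, if_false]
    by_cases hin : PySem.Set.contains cur rt = true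
    · -- really installed: both remove
      have hsome : a.get? (ry, rx) = some cur := Xsome_of_contains a _ rt hin
      have hsomeB : g.get? (rx, ry) = some curB :=
        Xsome_of_contains g _ rt (by rw [← hcc]; exact hin)
      rw [hsome, hsomeB]
      simp only [Option.isSome_some, if_true, hin, ← hcur, ← hcurB]
      have hinB : PySem.Set.contains curB rt = true := by rw [← hcc]; exact hin
      rw [hinB]
      simp only [if_true]
      have hA2 := XmemA_del a rx ry rt
      have hB2 := XmemB_del g rx ry rt
      rw [← hcur] at hA2
      rw [← hcurB] at hB2
      have hce := Xcheck_eq a g _ _ rx ry rt false hmem' hvalid hA2 hB2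
      rw [hce]
      by_cases hok : bOkAfter (g.insert (rx, ry) (PySem.Set.discard curB rt)) rx ry = true
      · rw [hok]; simp only [if_true]
        refine ⟨PySem.Dict.nodup_keys_insert _ _ _ hndA, PySem.Dict.nodup_keys_insert _ _ _ hndG, ?_, ?_, ?_, ?_⟩
        · exact XWF_insert _ _ _ hwfA (PySem.Set.nodup_discard _ _ (hwfA _))
        · exact XWF_insert _ _ _ hwfG (PySem.Set.nodup_discard _ _ (hwfG _))
        · intro x y t; rw [hA2, hB2]; unfold updMem; split_ifs with hh; exacts [rfl, hmem x y t]
        · rw [← XcheckRule_iff]; rw [hce]; exact hok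
      · rw [Bool.not_eq_true] at hok
        rw [hok]
        simp only [Bool.false_eq_true, if_false]
        exact ⟨hndA, hndG, hwfA, hwfG, hmem, hvalid⟩
    · -- nothing to remove: both unchanged
      have hAkeep : StInv a g := ⟨hndA, hndG, hwfA, hwfG, hmem, hvalid⟩
      have hchk : checkRule a = true := (XcheckRule_iff a).2 hvalid
      by_cases hsome : (a.get? (ry, rx)).isSome = true
      · simp only [hsome, if_true, ← hcur, hin, Bool.false_eq_true, if_false, hchk]
        cases hgB : g.get? (rx, ry) with
        | none => simpa using hAkeep
        | some s =>
          have hs : s = curB := by rw [hcurB, PySem.Dict.getD_eq_get?_getD, hgB]; rfl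
          have : PySem.Set.contains s rt = false := by rw [hs, ← hcc]; simpa using hin
          simp only [this, Bool.false_eq_true, if_false]
          simpa using hAkeep
      · simp only [hsome, Bool.false_eq_true, if_false, hchk, if_true]
        cases hgB : g.get? (rx, ry) with
        | none => simpa using hAkeep
        | some s =>
          have hs : s = curB := by rw [hcurB, PySem.Dict.getD_eq_get?_getD, hgB]; rfl
          have : PySem.Set.contains s rt = false := by rw [hs, ← hcc]; simpa using hin
          simp only [this, Bool.false_eq_true, if_false]
          simpa using hAkeep
theorem Xbase : StInv PySem.Dict.empty PySem.Dict.empty := by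
  refine ⟨PySem.Dict.nodup_keys_empty, PySem.Dict.nodup_keys_empty, ?_, ?_, ?_, ?_⟩
  · intro k; rw [PySem.Dict.getD_empty]; exact List.nodup_nil
  · intro k; rw [PySem.Dict.getD_empty]; exact List.nodup_nil
  · intro x y t; unfold memA memB; rw [PySem.Dict.getD_empty, PySem.Dict.getD_empty]
  · intro u v; unfold cellok memA; rw [PySem.Dict.getD_empty]
    simp [PySem.Set.contains, PySem.Set.empty]

theorem Xfold (bf : List (List Int)) :
    ∀ (a g : PySem.Dict (Int × Int) (PySem.Set Int)), StInv a g →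
    (∀ r ∈ bf, 3 ≤ r.length) →
    StInv ((bf.map (fun r => ((PySem.List.pyGet? r 1).getD 0) :: ((PySem.List.pyGet? r 0).getD 0) :: r.drop 2)).foldl buildA a)
          (bf.foldl bStep g) := by
  induction bf with
  | nil => intro a g h _; exact h
  | cons r rest ih =>
    intro a g h hpre
    simp only [List.map_cons, List.foldl_cons]
    exact ih _ _ (Xstep_inv a g r h (hpre r (by simp)))
      (fun r' hr' => hpre r' (by simp [hr']))
def chunkA (kv : (Int × Int) × PySem.Set Int) : List (List Int) :=
  if PySem.Set.len kv.2 == 0 then []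
  else if PySem.Set.len kv.2 == 1 then [[kv.1.2, kv.1.1, (PySem.List.pyGet? kv.2 0).getD 0]]
  else if PySem.Set.len kv.2 == 2 then
    [[kv.1.2, kv.1.1, (PySem.List.pyGet? kv.2 0).getD 0], [kv.1.2, kv.1.1, (PySem.List.pyGet? kv.2 1).getD 0]]
  else []

theorem XrowsA_foldl (l : List ((Int × Int) × PySem.Set Int)) :
    (l.foldl (fun res kv =>
      let k := kv.1
      let v := kv.2
      if PySem.Set.len v == 0 then res
      else if PySem.Set.len v == 1 then
        res ++ [[k.2, k.1, (PySem.List.pyGet? v 0).getD 0]]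
      else if PySem.Set.len v == 2 then
        res ++ [[k.2, k.1, (PySem.List.pyGet? v 0).getD 0], [k.2, k.1, (PySem.List.pyGet? v 1).getD 0]]
      else res) []) = l.flatMap chunkA := by
  have hb : (fun (res : List (List Int)) (kv : (Int × Int) × PySem.Set Int) =>
      let k := kv.1
      let v := kv.2
      if PySem.Set.len v == 0 then res
      else if PySem.Set.len v == 1 then
        res ++ [[k.2, k.1, (PySem.List.pyGet? v 0).getD 0]]
      else if PySem.Set.len v == 2 then
        res ++ [[k.2, k.1, (PySem.List.pyGet? v 0).getD 0], [k.2, k.1, (PySem.List.pyGet? v 1).getD 0]]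
      else res) = (fun res kv => res ++ chunkA kv) := by
    funext res kv; dsimp only; unfold chunkA; split_ifs <;> simp
  rw [hb, PySem.List.foldl_append_eq_flatMap]
  rfl

-- the cells A's output loop emits: exactly those holding one or two types
def emitSet (v : PySem.Set Int) : PySem.Set Int := if v.length ≤ 2 then v else []

theorem XchunkA_map (kv : (Int × Int) × PySem.Set Int) :
    chunkA kv = (emitSet kv.2).map (fun t => [kv.1.2, kv.1.1, t]) := by
  obtain ⟨k, v⟩ := kv
  match v with
  | [] => rfl
  | [a] => simp [chunkA, emitSet, PySem.Set.len, pg0']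
  | [a, b] =>
    simp only [chunkA, emitSet, PySem.Set.len, pg0', pg1' a b []]
    norm_num
  | a :: b :: c :: r =>
    have hl : (a :: b :: c :: r).length = r.length + 3 := by simp
    simp only [chunkA, emitSet, PySem.Set.len, hl]
    have h1 : (r.length : Int) + 3 ≠ 0 := by omega
    have h2 : (r.length : Int) + 3 ≠ 1 := by omega
    have h3 : (r.length : Int) + 3 ≠ 2 := by omega
    have h4 : ¬ r.length + 3 ≤ 2 := by omega
    simp [h1, h2, h3, h4]

theorem XchunkB_map (kv : (Int × Int) × PySem.Set Int) :
    (if PySem.Set.len kv.2 == 1 || PySem.Set.len kv.2 == 2 then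
       kv.2.map (fun t => [kv.1.1, kv.1.2, t])
     else []) = (emitSet kv.2).map (fun t => [kv.1.1, kv.1.2, t]) := by
  obtain ⟨k, v⟩ := kv
  match v with
  | [] => rfl
  | [a] => simp [emitSet, PySem.Set.len]
  | [a, b] => simp [emitSet, PySem.Set.len]
  | a :: b :: c :: r =>
    have hl : (a :: b :: c :: r).length = r.length + 3 := by simp
    simp only [emitSet, PySem.Set.len, hl]
    have h2 : (r.length : Int) + 3 ≠ 1 := by omega
    have h3 : (r.length : Int) + 3 ≠ 2 := by omega
    have h4 : ¬ r.length + 3 ≤ 2 := by omega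
    simp [h2, h3, h4]

theorem Xmem_emitSet (v : PySem.Set Int) (t : Int) :
    t ∈ emitSet v ↔ t ∈ v ∧ v.length ≤ 2 := by
  unfold emitSet
  split_ifs with h <;> simp [h]

theorem Xnodup_emitSet (v : PySem.Set Int) (h : v.Nodup) : (emitSet v).Nodup := by
  unfold emitSet; split_ifs <;> simp [h]

theorem Xmem_rowsA (a : PySem.Dict (Int × Int) (PySem.Set Int)) (hnd : a.keys.Nodup)
    (row : List Int) :
    row ∈ a.items.flatMap (fun kv => (emitSet kv.2).map (fun t => [kv.1.2, kv.1.1, t])) ↔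
      ∃ x y t, row = [x, y, t] ∧ memA a x y t = true ∧
        (a.getD (y, x) PySem.Set.empty).length ≤ 2 := by
  simp only [List.mem_flatMap, List.mem_map]
  constructor
  · rintro ⟨kv, hkv, t, htv, rfl⟩
    obtain ⟨htv, hlen⟩ := (Xmem_emitSet _ _).1 htv
    refine ⟨kv.1.2, kv.1.1, t, rfl, ?_, ?_⟩
    · unfold memA
      rw [show ((kv.1.1, kv.1.2) : Int × Int) = kv.1 from rfl]
      rw [PySem.Dict.getD_of_mem_items a (by exact hkv) hnd]
      simpa using htv
    · rw [show ((kv.1.1, kv.1.2) : Int × Int) = kv.1 from rfl]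
      rw [PySem.Dict.getD_of_mem_items a (by exact hkv) hnd]
      exact hlen
  · rintro ⟨x, y, t, rfl, hm, hlen⟩
    unfold memA at hm
    have hsome := Xsome_of_contains a (y, x) t hm
    refine ⟨((y, x), a.getD (y, x) PySem.Set.empty), PySem.Dict.mem_items_of_get?_eq_some a hsome, t, ?_, rfl⟩
    rw [Xmem_emitSet]
    exact ⟨by simpa using hm, hlen⟩

theorem Xmem_rowsB (g : PySem.Dict (Int × Int) (PySem.Set Int)) (hnd : g.keys.Nodup)
    (row : List Int) :
    row ∈ g.items.flatMap (fun kv => (emitSet kv.2).map (fun t => [kv.1.1, kv.1.2, t])) ↔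
      ∃ x y t, row = [x, y, t] ∧ memB g x y t = true ∧
        (g.getD (x, y) PySem.Set.empty).length ≤ 2 := by
  simp only [List.mem_flatMap, List.mem_map]
  constructor
  · rintro ⟨kv, hkv, t, htv, rfl⟩
    obtain ⟨htv, hlen⟩ := (Xmem_emitSet _ _).1 htv
    refine ⟨kv.1.1, kv.1.2, t, rfl, ?_, ?_⟩
    · unfold memB
      rw [show ((kv.1.1, kv.1.2) : Int × Int) = kv.1 from rfl]
      rw [PySem.Dict.getD_of_mem_items g (by exact hkv) hnd]
      simpa using htv
    · rw [show ((kv.1.1, kv.1.2) : Int × Int) = kv.1 from rfl]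
      rw [PySem.Dict.getD_of_mem_items g (by exact hkv) hnd]
      exact hlen
  · rintro ⟨x, y, t, rfl, hm, hlen⟩
    unfold memB at hm
    have hsome := Xsome_of_contains g (x, y) t hm
    refine ⟨((x, y), g.getD (x, y) PySem.Set.empty), PySem.Dict.mem_items_of_get?_eq_some g hsome, t, ?_, rfl⟩
    rw [Xmem_emitSet]
    exact ⟨by simpa using hm, hlen⟩

theorem Xnodup_flat (l : List ((Int × Int) × PySem.Set Int)) (f : (Int × Int) → Int → List Int)
    (hk : (l.map (·.1)).Nodup) (hv : ∀ kv ∈ l, kv.2.Nodup)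
    (hfinj : ∀ k k' t t', f k t = f k' t' → k = k' ∧ t = t') :
    (l.flatMap (fun kv => (emitSet kv.2).map (fun t => f kv.1 t))).Nodup := by
  induction l with
  | nil => simp
  | cons kv rest ih =>
    simp only [List.flatMap_cons, List.nodup_append]
    refine ⟨?_, ih (by simpa using hk.of_cons) (fun kv' h => hv kv' (by simp [h])), ?_⟩
    · exact List.Nodup.map_on (fun t ht t' ht' h => (hfinj _ _ _ _ h).2)
        (Xnodup_emitSet _ (hv kv (by simp)))
    · intro p hp q hq
      obtain ⟨t, ht, rfl⟩ := List.mem_map.1 hp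
      obtain ⟨kv', hkv', hq'⟩ := List.mem_flatMap.1 hq
      obtain ⟨t', ht', rfl⟩ := List.mem_map.1 hq'
      intro hpq
      obtain ⟨hk1, hk2⟩ := hfinj _ _ _ _ hpq
      simp only [List.map_cons, List.nodup_cons] at hk
      exact hk.1 (by rw [hk1]; exact List.mem_map_of_mem hkv')

theorem XrowKeyA_inj (x y t x' y' t' : Int) (h : rowKeyA [x, y, t] = rowKeyA [x', y', t']) :
    x = x' ∧ y = y' ∧ t = t' := by
  unfold rowKeyA at h
  simp only [pg0', pg1', pg2', Option.getD_some, toLex_inj, Prod.mk.injEq] at h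
  exact ⟨h.1, h.2.1, h.2.2⟩

theorem Xsorted_eq (xs ys : List (List Int)) (hp : xs.Perm ys)
    (hnd : (ys.map rowKeyA).Nodup) :
    PySem.List.sorted xs rowKeyA false = PySem.List.sorted ys rowKeyA false := by
  apply PySem.List.sorted_eq_of_perm_of_pairwise_lt
  · exact (PySem.List.sorted_perm ys rowKeyA false).trans hp.symm
  · have h1 := PySem.List.sorted_pairwise ys rowKeyA
    have h2 : ((PySem.List.sorted ys rowKeyA false).map rowKeyA).Nodup := by
      have : ((PySem.List.sorted ys rowKeyA false).map rowKeyA).Perm (ys.map rowKeyA) :=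
        (PySem.List.sorted_perm ys rowKeyA false).map rowKeyA
      exact this.nodup_iff.2 hnd
    have h3 : (PySem.List.sorted ys rowKeyA false).Pairwise
        (fun a b => rowKeyA a ≠ rowKeyA b) := by
      rw [List.Nodup, List.pairwise_map] at h2
      exact h2
    exact (h1.and h3).imp (fun ⟨hle, hne⟩ => lt_of_le_of_ne hle hne)

theorem Xmain (n : Int) (bf : List (List Int))
    (hpre : ∀ r ∈ bf, 3 ≤ r.length) :
    solution n bf = solution_alt n bf := by
  unfold solution solution_alt
  dsimp only
  obtain ⟨hndA, hndG, hwfA, hwfG, hmem, hvalid⟩ :=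
    Xfold bf PySem.Dict.empty PySem.Dict.empty Xbase hpre
  set A := ((bf.map (fun r => ((PySem.List.pyGet? r 1).getD 0) :: ((PySem.List.pyGet? r 0).getD 0) :: r.drop 2)).foldl buildA PySem.Dict.empty) with hA
  set G := (bf.foldl bStep PySem.Dict.empty) with hG
  rw [XrowsA_foldl]
  rw [List.flatMap_congr (fun kv _ => XchunkA_map kv),
      List.flatMap_congr (fun kv _ => XchunkB_map kv)]
  have hwfA' : ∀ kv ∈ A.items, kv.2.Nodup := by
    intro kv hkv
    have hget := PySem.Dict.getD_of_mem_items A hkv hndA PySem.Set.empty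
    have hw := hwfA kv.1; rw [hget] at hw; exact hw
  have hwfG' : ∀ kv ∈ G.items, kv.2.Nodup := by
    intro kv hkv
    have hget := PySem.Dict.getD_of_mem_items G hkv hndG PySem.Set.empty
    have hw := hwfG kv.1; rw [hget] at hw; exact hw
  have hndA' : (A.items.map (·.1)).Nodup := hndA
  have hndG' : (G.items.map (·.1)).Nodup := hndG
  have hnA : (A.items.flatMap (fun kv => (emitSet kv.2).map (fun t => [kv.1.2, kv.1.1, t]))).Nodup := by
    apply Xnodup_flat _ (fun k t => [k.2, k.1, t]) hndA' hwfA'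
    intro k k' t t' h
    simp only [List.cons.injEq, and_true] at h
    exact ⟨Prod.ext h.2.1 h.1, h.2.2⟩
  have hnB : (G.items.flatMap (fun kv => (emitSet kv.2).map (fun t => [kv.1.1, kv.1.2, t]))).Nodup := by
    apply Xnodup_flat _ (fun k t => [k.1, k.2, t]) hndG' hwfG'
    intro k k' t t' h
    simp only [List.cons.injEq, and_true] at h
    exact ⟨Prod.ext h.1 h.2.1, h.2.2⟩
  -- corresponding cells hold equally many types
  have hlencells : ∀ x y : Int,
      (A.getD (y, x) PySem.Set.empty).length = (G.getD (x, y) PySem.Set.empty).length := by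
    intro x y
    apply List.Perm.length_eq
    rw [List.perm_ext_iff_of_nodup (hwfA _) (hwfG _)]
    intro s
    have h := hmem x y s
    unfold memA memB at h
    constructor
    · intro hs; have : PySem.Set.contains (A.getD (y, x) PySem.Set.empty) s = true := by simpa using hs
      rw [h] at this; simpa using this
    · intro hs; have : PySem.Set.contains (G.getD (x, y) PySem.Set.empty) s = true := by simpa using hs
      rw [← h] at this; simpa using this
  have hperm : (A.items.flatMap (fun kv => (emitSet kv.2).map (fun t => [kv.1.2, kv.1.1, t]))).Perm
      (G.items.flatMap (fun kv => (emitSet kv.2).map (fun t => [kv.1.1, kv.1.2, t]))) := by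
    rw [List.perm_ext_iff_of_nodup hnA hnB]
    intro row
    rw [Xmem_rowsA A hndA row, Xmem_rowsB G hndG row]
    constructor
    · rintro ⟨x, y, t, rfl, hm, hlen⟩
      exact ⟨x, y, t, rfl, by rw [← hmem]; exact hm, by rw [← hlencells]; exact hlen⟩
    · rintro ⟨x, y, t, rfl, hm, hlen⟩
      exact ⟨x, y, t, rfl, by rw [hmem]; exact hm, by rw [hlencells]; exact hlen⟩
  apply Xsorted_eq _ _ hperm
  apply List.Nodup.map_on _ hnB
  intro p hp q hq hk
  obtain ⟨x, y, t, rfl, -⟩ := (Xmem_rowsB G hndG p).1 hp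
  obtain ⟨x', y', t', rfl, -⟩ := (Xmem_rowsB G hndG q).1 hq
  obtain ⟨rfl, rfl, rfl⟩ := XrowKeyA_inj _ _ _ _ _ _ hk
  rfl

-- ===== VERDICT (by name: the statement is the Claim_ definition above) =====
theorem solution_spec : Claim_equal_solution := by
  intro n build_frame _ hpre
  unfold Spec_solution
  unfold Pre_solution at hpre
  exact Xmain n build_frame hpre
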